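-- pv_equiv track=rewrite | github.com/appleworm34/cool-code-kxx | mouse/mouse_gpt.py | prebrake_to_wide
-- ===== SOURCE A (Python) =====
-- from typing import Dict, List, Optional, Set, Tuple
--
-- def prebrake_to_wide(m:int) -> List[str]:
--     instr = []
--     while abs(m) > 2:
--         # BB brakes by 2 toward 0 per half-step; but BB is straight translation.
--         # Use towards 0; if m>0, BB reduces by 2; if already ≤2, stop.
--         instr.append("BB")
--         if m > 0:
--             m = max(0, m - 2)
--         elif m < 0:
--             m = min(0, m + 2)
--     # If now m==1 or 2, OK for wide; if m==0, we can accelerate with F1 in the corner (m_eff=0.5) but we keep F1.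
--     return instr
-- ===== SOURCE B (Python) =====
-- def prebrake_to_wide(m: int) -> list:
--     # closed form: number of braking steps is max(0, (abs(m)-1)//2)
--     return ["BB"] * max(0, (abs(m) - 1) // 2)
-- ===== Notes on version B (the rewrite author's own statement) =====
-- stated objective: simpler
-- what changed: Replaces the while-loop that repeatedly subtracts 2 and appends with a closed-form count max(0,(abs(m)-1)//2) and a single list replication.
import Mathlib
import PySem

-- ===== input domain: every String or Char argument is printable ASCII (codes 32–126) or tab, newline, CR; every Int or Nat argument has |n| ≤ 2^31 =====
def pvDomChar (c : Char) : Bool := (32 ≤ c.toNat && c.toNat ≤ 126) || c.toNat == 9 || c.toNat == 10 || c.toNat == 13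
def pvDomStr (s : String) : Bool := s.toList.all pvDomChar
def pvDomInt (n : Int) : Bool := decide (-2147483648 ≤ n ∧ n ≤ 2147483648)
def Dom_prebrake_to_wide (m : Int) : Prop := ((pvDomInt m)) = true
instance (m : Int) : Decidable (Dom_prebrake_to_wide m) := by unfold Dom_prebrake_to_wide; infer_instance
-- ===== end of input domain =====

-- B replaces A's subtract-by-2 while-loop with a closed-form step count and list replication (simpler).


-- ===== PORT A =====
-- literal port of A's while-loop: append "BB", move m two toward 0, until |m| ≤ 2
def prebrakeLoop (m : Int) (instr : List String) : List String :=
  if _h : |m| > 2 then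
    let instr' := instr ++ ["BB"]
    let m' : Int := if m > 0 then max 0 (m - 2) else if m < 0 then min 0 (m + 2) else m
    prebrakeLoop m' instr'
  else instr
termination_by m.natAbs
decreasing_by
  simp only [Int.abs_eq_natAbs] at _h
  split <;> rename_i h1
  · omega
  · split <;> omega

def prebrake_to_wide (m : Int) : List String := prebrakeLoop m []

-- ===== PORT B =====
def prebrake_to_wide_alt (m : Int) : List String :=
  List.replicate (max 0 (PySem.Int.floordiv (|m| - 1) 2)).toNat "BB"

-- ===== PRECONDITION & SPEC =====
def Spec_prebrake_to_wide (m : Int) (out : List String) : Prop := out = prebrake_to_wide_alt m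
instance (m : Int) (out : List String) : Decidable (Spec_prebrake_to_wide m out) := by unfold Spec_prebrake_to_wide; infer_instance

-- ===== CLAIM (what is proved, stated in full; the proofs are below) =====
def Claim_equal_prebrake_to_wide : Prop := ∀ (m : Int), Dom_prebrake_to_wide m → Spec_prebrake_to_wide m (prebrake_to_wide m)

-- ===== LEMMAS AND PROOFS =====

-- step count of the loop, in Nat
def brakeCount (m : Int) : Nat := (m.natAbs - 1) / 2

lemma prebrakeLoop_eq (m : Int) (instr : List String) :
    prebrakeLoop m instr = instr ++ List.replicate (brakeCount m) "BB" := by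
  fun_induction prebrakeLoop m instr with
  | case1 m instr h instr' m' ih =>
      rw [ih]
      have hm : brakeCount m = brakeCount m' + 1 := by
        simp only [Int.abs_eq_natAbs] at h
        unfold brakeCount m'
        split <;> rename_i h1
        · omega
        · split <;> omega
      simp [hm, instr', List.replicate_succ, List.append_assoc]
  | case2 m instr h =>
      have : brakeCount m = 0 := by
        simp only [Int.abs_eq_natAbs, not_lt] at h
        unfold brakeCount; omega
      simp [this]

lemma count_closed (m : Int) :
    (max 0 (PySem.Int.floordiv (|m| - 1) 2)).toNat = brakeCount m := by
  rw [PySem.Int.floordiv_eq_ediv_of_pos (by omega : (0:Int) < 2)]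
  unfold brakeCount
  rcases (by omega : 0 ≤ m ∨ m < 0) with h | h
  · rw [abs_of_nonneg h]; omega
  · rw [abs_of_neg h]; omega

-- ===== VERDICT (by name: the statement is the Claim_ definition above) =====
theorem prebrake_to_wide_spec : Claim_equal_prebrake_to_wide := by
  intro m _
  unfold Spec_prebrake_to_wide prebrake_to_wide prebrake_to_wide_alt
  rw [prebrakeLoop_eq, count_closed]
  simp
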